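-- pv_equiv track=rewrite | github.com/jormelcn/asignaciones-programacion | swap-alpha/swap-alpha.py | swapAlpha
-- ===== SOURCE A (Python) =====
-- def swapAlpha(chain) :
--     charList = list(chain)
--     mid = int(len(charList)/2)
--     end = len(charList) - 1
--     for i in range(mid) :
--         if charList[i].isalpha() and charList[end - i].isalpha() :
--             charList[i], charList[end - i] = charList[end - i], charList[i]
--         elif charList[i].isalpha() or charList[end - i].isalpha() :
--             return None
--     return ''.join(charList)
-- ===== SOURCE B (Python) =====
-- def swapAlpha(chain):
--     # Two separate passes: validate all symmetric pairs first, then build the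
--     # result by index instead of swapping a char list in place.
--     n = len(chain)
--     if any(chain[i].isalpha() != chain[n - 1 - i].isalpha() for i in range(n // 2)):
--         return None
--     return ''.join(chain[n - 1 - i]
--                    if chain[i].isalpha() and chain[n - 1 - i].isalpha()
--                    else chain[i]
--                    for i in range(n))
-- ===== Notes on version B (the rewrite author's own statement) =====
-- stated objective: simpler
-- what changed: B replaces A's in-place swap-and-early-return loop over a mutable char list by two separate pure passes: a validation pass over the first half, then an index-based construction of the whole output string.
import Mathlib
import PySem

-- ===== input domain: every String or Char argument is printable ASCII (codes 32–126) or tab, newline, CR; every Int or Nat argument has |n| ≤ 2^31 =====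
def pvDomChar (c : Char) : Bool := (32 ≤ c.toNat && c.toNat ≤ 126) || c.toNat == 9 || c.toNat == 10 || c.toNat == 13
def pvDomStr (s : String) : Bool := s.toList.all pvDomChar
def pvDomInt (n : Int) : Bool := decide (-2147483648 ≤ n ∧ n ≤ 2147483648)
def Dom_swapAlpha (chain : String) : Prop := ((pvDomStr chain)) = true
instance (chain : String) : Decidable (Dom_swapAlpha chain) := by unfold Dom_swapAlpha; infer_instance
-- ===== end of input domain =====

-- ===== PORT A =====
-- B changes only the decomposition (validate then rebuild, instead of in-place swapping
-- with early return); same cost, no speed claim.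
def swapAlphaLoop (e : Nat) : List Char → List Nat → Option (List Char)
  | l, [] => some l
  | l, i :: rest =>
    let a := l.getD i ' '
    let b := l.getD (e - i) ' '
    if PySem.Chars.isalpha a && PySem.Chars.isalpha b then
      swapAlphaLoop e ((l.set i b).set (e - i) a) rest
    else if PySem.Chars.isalpha a || PySem.Chars.isalpha b then none
    else swapAlphaLoop e l rest

def swapAlpha (chain : String) : Option String :=
  let charList := chain.toList
  (swapAlphaLoop (charList.length - 1) charList (List.range (charList.length / 2))).map String.ofList

-- ===== PORT B =====
def swapAlpha_alt (chain : String) : Option String :=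
  let l := chain.toList
  let n := l.length
  if (List.range (n / 2)).any
      (fun i => PySem.Chars.isalpha (l.getD i ' ') != PySem.Chars.isalpha (l.getD (n - 1 - i) ' ')) then
    none
  else
    some (String.ofList ((List.range n).map (fun j =>
      if PySem.Chars.isalpha (l.getD j ' ') && PySem.Chars.isalpha (l.getD (n - 1 - j) ' ') then
        l.getD (n - 1 - j) ' '
      else
        l.getD j ' ')))

-- ===== PRECONDITION & SPEC =====
def Spec_swapAlpha (chain : String) (out : Option String) : Prop := out = swapAlpha_alt chain
instance (chain : String) (out : Option String) : Decidable (Spec_swapAlpha chain out) := by unfold Spec_swapAlpha; infer_instance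

-- ===== CLAIM (what is proved, stated in full; the proofs are below) =====
def Claim_equal_swapAlpha : Prop := ∀ (chain : String), Dom_swapAlpha chain → Spec_swapAlpha chain (swapAlpha chain)

-- ===== LEMMAS AND PROOFS =====

-- The list A's loop has built after processing the first k indices: every position in
-- the processed outer region (j < k or n-1-j < k) whose symmetric pair is alphabetic on
-- both sides has been swapped; everything else still holds the original character.
def pvBuild (l : List Char) (k : Nat) : List Char :=
  (List.range l.length).map (fun j =>
    if (j < k ∨ l.length - 1 - j < k) ∧
        (PySem.Chars.isalpha (l.getD j ' ') && PySem.Chars.isalpha (l.getD (l.length - 1 - j) ' ')) = true then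
      l.getD (l.length - 1 - j) ' '
    else
      l.getD j ' ')

lemma pvBuild_length (l : List Char) (k : Nat) : (pvBuild l k).length = l.length := by
  simp [pvBuild]

lemma pvBuild_getD (l : List Char) (k j : Nat) (hj : j < l.length) :
    (pvBuild l k).getD j ' ' =
      if (j < k ∨ l.length - 1 - j < k) ∧
          (PySem.Chars.isalpha (l.getD j ' ') && PySem.Chars.isalpha (l.getD (l.length - 1 - j) ' ')) = true then
        l.getD (l.length - 1 - j) ' '
      else
        l.getD j ' ' := by
  simp [pvBuild, List.getD_eq_getElem?_getD, hj]

lemma pvBuild_zero (l : List Char) : pvBuild l 0 = l := by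
  apply List.ext_getElem
  · simp [pvBuild_length]
  · intro j h1 h2
    simp [pvBuild, List.getD_eq_getElem?_getD]
    simp at h2
    simp [List.getElem?_eq_getElem h2]

lemma pvBuild_outer_getD (l : List Char) (k j : Nat) (hj : j < l.length)
    (h1 : ¬ j < k) (h2 : ¬ l.length - 1 - j < k) :
    (pvBuild l k).getD j ' ' = l.getD j ' ' := by
  rw [pvBuild_getD l k j hj]
  simp [h1, h2]

lemma pvBuild_getElem (l : List Char) (k j : Nat) (h : j < (pvBuild l k).length) :
    (pvBuild l k)[j] =
      if (j < k ∨ l.length - 1 - j < k) ∧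
          (PySem.Chars.isalpha (l.getD j ' ') && PySem.Chars.isalpha (l.getD (l.length - 1 - j) ' ')) = true then
        l.getD (l.length - 1 - j) ' '
      else
        l.getD j ' ' := by
  have hn : j < l.length := by simpa [pvBuild_length] using h
  rw [← List.getD_eq_getElem (pvBuild l k) ' ' h, pvBuild_getD l k j hn]

-- one loop step when both pair members are alphabetic: the two in-place sets extend the build
lemma pvBuild_succ_swap (l : List Char) (k : Nat) (hk : k < l.length / 2)
    (h : (PySem.Chars.isalpha (l.getD k ' ') && PySem.Chars.isalpha (l.getD (l.length - 1 - k) ' ')) = true) :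
    ((pvBuild l k).set k (l.getD (l.length - 1 - k) ' ')).set (l.length - 1 - k) (l.getD k ' ')
      = pvBuild l (k + 1) := by
  have hln : 0 < l.length := by have := Nat.div_le_self l.length 2; omega
  apply List.ext_getElem
  · simp [pvBuild_length]
  · intro j hja hjb
    have hn : j < l.length := by simpa [pvBuild_length] using hjb
    rw [List.getElem_set, List.getElem_set, pvBuild_getElem l (k+1) j hjb]
    by_cases hj1 : l.length - 1 - k = j
    · rw [if_pos hj1, ← hj1]
      have hsym : l.length - 1 - (l.length - 1 - k) = k := by omega
      rw [hsym, if_pos ⟨Or.inr (by omega), by rw [Bool.and_comm] at h; exact h⟩]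
    · rw [if_neg hj1]
      by_cases hj2 : k = j
      · rw [if_pos hj2, ← hj2, if_pos ⟨Or.inl (by omega), h⟩]
      · rw [if_neg hj2]
        rw [pvBuild_getElem l k j (by simpa [pvBuild_length] using hn)]
        split_ifs with c1 c2 c2
        · rfl
        · exact absurd ⟨c1.1.elim (fun h' => Or.inl (by omega)) (fun h' => Or.inr (by omega)), c1.2⟩ c2
        · exfalso; apply c1
          refine ⟨?_, c2.2⟩
          rcases c2.1 with h' | h'
          · rcases Nat.lt_or_ge j k with h'' | h''
            · exact Or.inl h''
            · exact absurd (by omega : k = j) hj2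
          · rcases Nat.lt_or_ge (l.length - 1 - j) k with h'' | h''
            · exact Or.inr h''
            · exact absurd (by omega : l.length - 1 - k = j) hj1
        · rfl

-- one loop step when neither pair member is alphabetic: the build does not change
lemma pvBuild_succ_skip (l : List Char) (k : Nat)
    (ha : PySem.Chars.isalpha (l.getD k ' ') = false)
    : pvBuild l (k + 1) = pvBuild l k := by
  apply List.ext_getElem
  · simp [pvBuild_length]
  · intro j hja hjb
    have hn : j < l.length := by simpa [pvBuild_length] using hja
    rw [pvBuild_getElem l (k+1) j hja, pvBuild_getElem l k j hjb]
    split_ifs with c1 c2 c2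
    · rfl
    · exfalso; apply c2
      refine ⟨?_, c1.2⟩
      rcases c1.1 with h' | h'
      · rcases Nat.lt_or_ge j k with h'' | h''
        · exact Or.inl h''
        · have hjk : j = k := by omega
          rw [hjk, ha] at c1
          simp at c1
      · rcases Nat.lt_or_ge (l.length - 1 - j) k with h'' | h''
        · exact Or.inr h''
        · have hjk : l.length - 1 - j = k := by omega
          rw [hjk, ha] at c1
          simp at c1
    · exact absurd ⟨c2.1.elim (fun h' => Or.inl (by omega)) (fun h' => Or.inr (by omega)), c2.2⟩ c1
    · rfl

-- the main invariant: A's loop from index k, started on the partially-swapped list,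
-- computes B's validation verdict and, on success, the fully swapped build
lemma swapAlphaLoop_spec (l : List Char) (m : Nat) :
    ∀ k, k + m ≤ l.length / 2 →
      swapAlphaLoop (l.length - 1) (pvBuild l k) (List.range' k m) =
        if (List.range' k m).any
            (fun i => PySem.Chars.isalpha (l.getD i ' ') != PySem.Chars.isalpha (l.getD (l.length - 1 - i) ' ')) then
          none
        else some (pvBuild l (k + m)) := by
  induction m with
  | zero => intro k hk; simp [swapAlphaLoop]
  | succ m ih =>
    intro k hk
    have hkm : k < l.length / 2 := by omega
    have hln : 0 < l.length := by have := Nat.div_le_self l.length 2; omega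
    have hk1 : k < l.length := by omega
    have hk2 : l.length - 1 - k < l.length := by omega
    have hnk : ¬ l.length - 1 - k < k := by omega
    have hkk : ¬ k < k := lt_irrefl k
    have hsymk : ¬ l.length - 1 - (l.length - 1 - k) < k := by omega
    have hkra : (pvBuild l k).getD k ' ' = l.getD k ' ' := pvBuild_outer_getD l k k hk1 hkk hnk
    have hkrb : (pvBuild l k).getD (l.length - 1 - k) ' ' = l.getD (l.length - 1 - k) ' ' :=
      pvBuild_outer_getD l k _ hk2 hnk hsymk
    rw [List.range'_succ]
    show swapAlphaLoop (l.length - 1) (pvBuild l k) (k :: List.range' (k+1) m) = _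
    rw [swapAlphaLoop]
    simp only [hkra, hkrb]
    have harith : k + (m + 1) = k + 1 + m := by omega
    simp only [List.getD_eq_getElem?_getD] at ih ⊢
    by_cases hA : PySem.Chars.isalpha (l[k]?.getD ' ') = true <;>
      by_cases hB : PySem.Chars.isalpha (l[l.length - 1 - k]?.getD ' ') = true
    · rw [if_pos (by simp [hA, hB])]
      have hswap := pvBuild_succ_swap l k hkm
        (by simp [List.getD_eq_getElem?_getD, hA, hB])
      simp only [List.getD_eq_getElem?_getD] at hswap
      rw [hswap, ih (k+1) (by omega)]
      simp only [List.any_cons, hA, hB, harith, bne_self_eq_false, Bool.false_or]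
    · rw [if_neg (by simp [hB]), if_pos (by simp [hA])]
      simp only [List.any_cons]
      simp at hB
      simp [hA, hB]
    · rw [if_neg (by simp [hA]), if_pos (by simp [hB])]
      simp only [List.any_cons]
      simp at hA
      simp [hA, hB]
    · simp at hA hB
      rw [if_neg (by simp [hA]), if_neg (by simp [hA, hB])]
      have hskip := pvBuild_succ_skip l k
        (by simp [List.getD_eq_getElem?_getD, hA])
      rw [show pvBuild l k = pvBuild l (k + 1) from hskip.symm, ih (k+1) (by omega)]
      simp only [List.any_cons, hA, hB, harith, bne_self_eq_false, Bool.false_or]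

-- on success, the fully swapped build is exactly B's index-based construction
lemma pvBuild_mid_eq (l : List Char) :
    pvBuild l (l.length / 2) =
      (List.range l.length).map (fun j =>
        if PySem.Chars.isalpha (l.getD j ' ') && PySem.Chars.isalpha (l.getD (l.length - 1 - j) ' ') then
          l.getD (l.length - 1 - j) ' '
        else l.getD j ' ') := by
  unfold pvBuild
  apply List.map_congr_left
  intro j hj
  rw [List.mem_range] at hj
  by_cases hb : (PySem.Chars.isalpha (l.getD j ' ') && PySem.Chars.isalpha (l.getD (l.length - 1 - j) ' ')) = true
  · rw [if_pos hb]
    by_cases hr : j < l.length / 2 ∨ l.length - 1 - j < l.length / 2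
    · rw [if_pos ⟨hr, hb⟩]
    · -- only possible at the odd middle index, where j = l.length - 1 - j
      rw [if_neg (fun h => hr h.1)]
      have : l.length - 1 - j = j := by omega
      rw [this]
  · rw [if_neg hb, if_neg (fun h => hb h.2)]

-- ===== VERDICT (by name: the statement is the Claim_ definition above) =====
theorem swapAlpha_spec : Claim_equal_swapAlpha := by
  intro chain _
  unfold Spec_swapAlpha swapAlpha swapAlpha_alt
  set l := chain.toList with hl
  simp only []
  rw [List.range_eq_range']
  have hloop := swapAlphaLoop_spec l (l.length / 2) 0 (by omega)
  rw [pvBuild_zero l] at hloop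
  rw [hloop, ← List.range_eq_range']
  by_cases hc : (List.range (l.length / 2)).any
      (fun i => PySem.Chars.isalpha (l.getD i ' ') != PySem.Chars.isalpha (l.getD (l.length - 1 - i) ' ')) = true
  · rw [if_pos hc, if_pos hc]; rfl
  · rw [if_neg hc, if_neg hc]
    simp only [Nat.zero_add, Option.map_some]
    rw [pvBuild_mid_eq]
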